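-- pv_equiv track=rewrite | github.com/brunodantas/coding-questions | subsequence.py | init_pdict
-- ===== SOURCE A (Python) =====
-- def init_pdict(words):
--     pdict = dict()
--     for w in words:
--         prefix = w[1][0]
--         if prefix not in pdict:
--             pdict[prefix] = [w]
--         else:
--             pdict[prefix].append(w)
--     return pdict
-- ===== SOURCE B (Python) =====
-- def init_pdict(words):
--     # Alternative decomposition: collect the distinct prefixes first (in first-seen
--     # order), then build each group with one comprehension pass per prefix.
--     prefixes = list(dict.fromkeys(w[1][0] for w in words))
--     return {p: [w for w in words if w[1][0] == p] for p in prefixes}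
-- ===== Notes on version B (the rewrite author's own statement) =====
-- stated objective: alternative
-- what changed: Replaces the single grouping pass with a membership branch by a two-phase build: ordered-dedup of the prefix characters, then one filter comprehension per distinct prefix.
import Mathlib
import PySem

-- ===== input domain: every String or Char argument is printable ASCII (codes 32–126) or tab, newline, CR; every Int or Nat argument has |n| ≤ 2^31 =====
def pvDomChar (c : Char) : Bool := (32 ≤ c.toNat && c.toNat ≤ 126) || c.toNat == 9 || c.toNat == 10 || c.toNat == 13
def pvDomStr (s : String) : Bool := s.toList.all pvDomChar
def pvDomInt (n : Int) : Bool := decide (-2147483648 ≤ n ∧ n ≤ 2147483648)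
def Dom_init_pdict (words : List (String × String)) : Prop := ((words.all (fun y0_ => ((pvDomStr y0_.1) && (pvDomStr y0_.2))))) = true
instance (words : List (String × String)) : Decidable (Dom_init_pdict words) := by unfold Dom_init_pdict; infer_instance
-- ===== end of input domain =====

-- B builds the dict in two phases (ordered-dedup of prefixes, then one filter pass per
-- distinct prefix) instead of A's single grouping pass with a membership branch.


-- ===== PORT A =====
-- w[1][0] as a one-character Python string; the "" default is never reached inside Pre_
def pvPfx (w : String × String) : String :=
  match PySem.Str.pyGet? w.2 0 with
  | some c => String.ofList [c]
  | none => ""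

def init_pdict (words : List (String × String)) : List (String × List (String × String)) :=
  (words.foldl (fun d w =>
      let pfx := pvPfx w
      if d.contains pfx = false then d.insert pfx [w]
      else d.modify pfx [] (· ++ [w]))
    PySem.Dict.empty).items

-- ===== PORT B =====
def init_pdict_alt (words : List (String × String)) : List (String × List (String × String)) :=
  let prefixes := PySem.List.dedup (words.map pvPfx)
  prefixes.map (fun p => (p, words.filter (fun w => pvPfx w == p)))

-- ===== PRECONDITION & SPEC =====
-- Pre_ excludes exactly the inputs where some second component is the empty string:
-- there Python A (and B) raise IndexError on w[1][0].
def Pre_init_pdict (words : List (String × String)) : Prop :=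
  ∀ w ∈ words, w.2.toList ≠ []
instance (words : List (String × String)) : Decidable (Pre_init_pdict words) := by
  unfold Pre_init_pdict; infer_instance

def pvWitness_init_pdict : (List (String × String)) :=
  [("apple", "ab"), ("box", "b"), ("cat", "ax")]

def Spec_init_pdict (words : List (String × String)) (out : List (String × List (String × String))) : Prop := out = init_pdict_alt words
instance (words : List (String × String)) (out : List (String × List (String × String))) : Decidable (Spec_init_pdict words out) := by unfold Spec_init_pdict; infer_instance

-- ===== CLAIM (what is proved, stated in full; the proofs are below) =====
def Claim_equal_init_pdict : Prop := ∀ (words : List (String × String)), Dom_init_pdict words → Pre_init_pdict words → Spec_init_pdict words (init_pdict words)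

-- ===== LEMMAS AND PROOFS =====

-- A's branchy loop body is exactly dict-modify with default []
lemma step_eq_modify (d : PySem.Dict String (List (String × String))) (w : String × String) :
    (if d.contains (pvPfx w) = false then d.insert (pvPfx w) [w]
     else d.modify (pvPfx w) [] (· ++ [w]))
      = d.modify (pvPfx w) [] (· ++ [w]) := by
  by_cases h : d.contains (pvPfx w) = false
  · simp [h, PySem.Dict.modify, PySem.Dict.getD_of_not_contains d ([] : List (String × String)) h]
  · simp [h]

lemma foldl_eq_modify (words : List (String × String)) :
    words.foldl (fun d w =>
        let pfx := pvPfx w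
        if d.contains pfx = false then d.insert pfx [w]
        else d.modify pfx [] (· ++ [w])) PySem.Dict.empty
      = words.foldl (fun d w => d.modify (pvPfx w) [] (· ++ [w])) PySem.Dict.empty :=
  PySem.List.foldl_congr_mem _ _ _ _ (fun d w _ => step_eq_modify d w)

-- ===== VERDICT (by name: the statement is the Claim_ definition above) =====
theorem init_pdict_spec : Claim_equal_init_pdict := by
  intro words _ _
  unfold Spec_init_pdict init_pdict init_pdict_alt
  rw [foldl_eq_modify]
  set D := words.foldl (fun d w => d.modify (pvPfx w) [] (· ++ [w])) PySem.Dict.empty with hD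
  have hkeys : D.keys = PySem.Set.ofList (words.map pvPfx) := by
    rw [hD, PySem.Dict.keys_foldl_modify_key words pvPfx [] (fun _ w => (· ++ [w]))]
    simp [PySem.Dict.keys_empty, PySem.Set.update, PySem.Set.ofList_eq_foldl]
  have hnd : D.keys.Nodup := by
    rw [hD]
    exact PySem.Dict.nodup_keys_foldl_modify_key words pvPfx [] (fun _ w => (· ++ [w]))
      PySem.Dict.empty (by simp [PySem.Dict.keys_empty])
  have hgetD : ∀ k, D.getD k [] = words.filter (fun w => pvPfx w == k) := by
    intro k
    have hm : D = (words.map (fun w => (pvPfx w, w))).foldl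
        (fun d p => d.modify p.1 [] (· ++ [p.2])) PySem.Dict.empty := by
      rw [hD, List.foldl_map]
    rw [hm, PySem.Dict.getD_foldl_modify_append]
    simp [List.filter_map, Function.comp_def]
  rw [PySem.Dict.items_eq_map_keys D hnd [], hkeys]
  simp only [PySem.List.dedup_eq_ofList]
  exact List.map_congr_left (fun p _ => by rw [hgetD p])
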